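-- pv_equiv track=rewrite | github.com/onero/aCTF-Writeup | public/NC3/misc/in-my-prime/scripts/in_my_prime.py | decimals_to_base_7
-- ===== SOURCE A (Python) =====
-- def decimals_to_base_7(decimals):
--     base_7_results = []
--
--     for decimal_number in decimals:
--         result = ""
--
--         while decimal_number > 0:
--             remainder = decimal_number % 7
--             result = str(remainder) + result
--             decimal_number //= 7
--
--         base_7_results.append(int(result) if result else 0)
--
--     return base_7_results
-- ===== SOURCE B (Python) =====
-- def _enc(n):
--     # base-7 digits of n read as a decimal number: _enc(n) = _enc(n // 7) * 10 + n % 7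
--     return 0 if n <= 0 else _enc(n // 7) * 10 + n % 7
--
--
-- def decimals_to_base_7(decimals):
--     return [_enc(n) for n in decimals]
-- ===== Notes on version B (the rewrite author's own statement) =====
-- stated objective: alternative
-- what changed: A builds each result by a while-loop that prepends remainder characters into a string and then re-parses it with int(); B never touches strings: a recursive helper computes the same number purely arithmetically as _enc(n) = _enc(n // 7) * 10 + n % 7, and the outer loop/append becomes a list comprehension.
import Mathlib
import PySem

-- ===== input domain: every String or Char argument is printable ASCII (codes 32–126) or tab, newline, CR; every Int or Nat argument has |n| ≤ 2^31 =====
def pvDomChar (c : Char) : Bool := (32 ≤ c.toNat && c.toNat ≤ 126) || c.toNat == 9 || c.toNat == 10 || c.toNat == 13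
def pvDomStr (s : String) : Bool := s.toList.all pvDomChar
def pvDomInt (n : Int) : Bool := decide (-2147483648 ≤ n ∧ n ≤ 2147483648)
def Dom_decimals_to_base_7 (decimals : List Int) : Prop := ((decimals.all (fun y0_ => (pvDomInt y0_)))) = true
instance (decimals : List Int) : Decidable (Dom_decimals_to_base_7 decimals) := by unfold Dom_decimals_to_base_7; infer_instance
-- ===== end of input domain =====

-- B drops A's string round-trip (prepend remainder chars, then int()) in favour of a purely
-- arithmetic recursion _enc(n) = _enc(n//7)*10 + n%7; same cost (objective: alternative).


-- ===== PORT A =====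
-- the while-loop: result = str(decimal_number % 7) + result; decimal_number //= 7
def pvA_loop (n : Int) (result : String) : String :=
  if _h : n > 0 then
    pvA_loop (PySem.Int.floordiv n 7) (PySem.Int.toStr (PySem.Int.mod n 7) ++ result)
  else result
termination_by n.toNat
decreasing_by
  rw [PySem.Int.floordiv_eq_ediv_of_pos (by omega)]
  omega

-- 'int(result) if result else 0'. The loop only ever hands int() the empty string or a
-- nonempty string of ASCII digits '0'-'9' (no sign, whitespace or '_'); on exactly those
-- strings Python's int() is this left-to-right digit fold (hand port, exact there).
def pvPyInt (result : String) : Int :=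
  if result = "" then 0
  else result.toList.foldl (fun a c => a * 10 + ((c.toNat : Int) - 48)) 0

def decimals_to_base_7 (decimals : List Int) : List Int :=
  decimals.foldl (fun base_7_results decimal_number =>
    base_7_results ++ [pvPyInt (pvA_loop decimal_number "")]) []

-- ===== PORT B =====
-- _enc(n) = 0 if n <= 0 else _enc(n // 7) * 10 + n % 7  (pure arithmetic, no strings)
def pvB_enc (n : Int) : Int :=
  if _h : n ≤ 0 then 0
  else pvB_enc (PySem.Int.floordiv n 7) * 10 + PySem.Int.mod n 7
termination_by n.toNat
decreasing_by
  rw [PySem.Int.floordiv_eq_ediv_of_pos (by omega)]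
  omega

def decimals_to_base_7_alt (decimals : List Int) : List Int :=
  decimals.map (fun n => pvB_enc n)

-- ===== PRECONDITION & SPEC =====
def Spec_decimals_to_base_7 (decimals : List Int) (out : List Int) : Prop := out = decimals_to_base_7_alt decimals
instance (decimals : List Int) (out : List Int) : Decidable (Spec_decimals_to_base_7 decimals out) := by unfold Spec_decimals_to_base_7; infer_instance

-- ===== CLAIM (what is proved, stated in full; the proofs are below) =====
def Claim_equal_decimals_to_base_7 : Prop := ∀ (decimals : List Int), Dom_decimals_to_base_7 decimals → Spec_decimals_to_base_7 decimals (decimals_to_base_7 decimals)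

-- ===== LEMMAS AND PROOFS =====

-- the character list A's loop accumulates for n (most-significant digit first)
def pvDigits (n : Int) : List Char :=
  if _h : n ≤ 0 then []
  else pvDigits (PySem.Int.floordiv n 7) ++ (PySem.Int.toStr (PySem.Int.mod n 7)).toList
termination_by n.toNat
decreasing_by
  rw [PySem.Int.floordiv_eq_ediv_of_pos (by omega)]
  omega

-- 10^(number of base-7 digits of n)
def pvTen (n : Int) : Int :=
  if _h : n ≤ 0 then 1
  else 10 * pvTen (PySem.Int.floordiv n 7)
termination_by n.toNat
decreasing_by
  rw [PySem.Int.floordiv_eq_ediv_of_pos (by omega)]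
  omega

theorem pvA_loop_toList (n : Int) (s : String) :
    (pvA_loop n s).toList = pvDigits n ++ s.toList := by
  by_cases h : n > 0
  · rw [pvA_loop, pvDigits]
    simp only [h, dif_pos, dif_neg (by omega : ¬ n ≤ 0)]
    rw [pvA_loop_toList (PySem.Int.floordiv n 7)]
    simp
  · rw [pvA_loop, pvDigits]
    simp [h, (by omega : n ≤ 0)]
termination_by n.toNat
decreasing_by
  rw [PySem.Int.floordiv_eq_ediv_of_pos (by omega)]
  omega

-- str(m) for a single base-7 remainder m = n % 7
theorem pv_toStr_digit (m : Int) (h0 : 0 ≤ m) (h7 : m < 7) :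
    (PySem.Int.toStr m).toList = [Char.ofNat (48 + m.toNat)] := by
  interval_cases m <;> decide

theorem pv_char_val (m : Int) (h0 : 0 ≤ m) (h7 : m < 7) :
    ((Char.ofNat (48 + m.toNat)).toNat : Int) - 48 = m := by
  interval_cases m <;> decide

theorem pv_foldl_digits (n : Int) (a : Int) :
    (pvDigits n).foldl (fun a c => a * 10 + ((c.toNat : Int) - 48)) a
      = a * pvTen n + pvB_enc n := by
  by_cases h : n ≤ 0
  · rw [pvDigits, pvTen, pvB_enc]
    simp [h]
  · rw [pvDigits, pvTen, pvB_enc, dif_neg h, dif_neg h, dif_neg h]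
    rw [List.foldl_append,
        pv_foldl_digits (PySem.Int.floordiv n 7) a,
        pv_toStr_digit (PySem.Int.mod n 7)
          (PySem.Int.mod_nonneg n (by norm_num)) (PySem.Int.mod_lt n (by norm_num))]
    have hm := pv_char_val (PySem.Int.mod n 7)
      (PySem.Int.mod_nonneg n (by norm_num)) (PySem.Int.mod_lt n (by norm_num))
    simp only [List.foldl_cons, List.foldl_nil, hm]
    ring
termination_by n.toNat
decreasing_by
  rw [PySem.Int.floordiv_eq_ediv_of_pos (by omega)]
  omega

theorem pvDigits_ne_nil (n : Int) (h : 0 < n) : pvDigits n ≠ [] := by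
  rw [pvDigits, dif_neg (by omega : ¬ n ≤ 0),
      pv_toStr_digit (PySem.Int.mod n 7)
        (PySem.Int.mod_nonneg n (by norm_num)) (PySem.Int.mod_lt n (by norm_num))]
  simp

theorem pv_elem_eq (n : Int) : pvPyInt (pvA_loop n "") = pvB_enc n := by
  unfold pvPyInt
  by_cases h : 0 < n
  · have hne : pvA_loop n "" ≠ "" := by
      intro hc
      have := pvA_loop_toList n ""
      rw [hc] at this
      simp at this
      exact pvDigits_ne_nil n h this
    rw [if_neg hne, pvA_loop_toList]
    simpa using pv_foldl_digits n 0
  · have : pvA_loop n "" = "" := by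
      rw [pvA_loop]; simp [h]
    rw [if_pos this, pvB_enc]
    simp [(by omega : n ≤ 0)]

theorem pv_foldl_map (l : List Int) (acc : List Int) :
    l.foldl (fun base_7_results decimal_number =>
      base_7_results ++ [pvPyInt (pvA_loop decimal_number "")]) acc
    = acc ++ l.map (fun n => pvB_enc n) := by
  induction l generalizing acc with
  | nil => simp
  | cons x xs ih =>
    simp only [List.foldl_cons, List.map_cons]
    rw [ih, pv_elem_eq]
    simp

-- ===== VERDICT (by name: the statement is the Claim_ definition above) =====
theorem decimals_to_base_7_spec : Claim_equal_decimals_to_base_7 := by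
  intro decimals _
  unfold Spec_decimals_to_base_7 decimals_to_base_7 decimals_to_base_7_alt
  rw [pv_foldl_map]
  simp
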